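-- pv_equiv track=rewrite | github.com/l2yujw/CodingTest | 프로그래머스/3/42884. 단속카메라/단속카메라.py | solution
-- ===== SOURCE A (Python) =====
-- def solution(routes):
--     routes.sort(key = lambda x: x[1])
--
--     answer = 0
--     key = -30001
--     for route in routes:
--         if route[0] > key:
--             answer += 1
--             key = route[1]
--     return answer
-- ===== SOURCE B (Python) =====
-- def solution(routes):
--     remaining = sorted(routes, key=lambda r: r[1])
--     answer = 0
--     key = -30001
--     while True:
--         remaining = [p for p in remaining if p[0] > key]
--         if not remaining:
--             return answer
--         answer += 1
--         key = remaining[0][1]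
--         remaining = remaining[1:]
-- ===== Notes on version B (the rewrite author's own statement) =====
-- stated objective: alternative
-- what changed: B replaces A's single-pass scan with an if on a (answer, key) state machine by a round-based stabbing loop: each round it rebuilds the list of still-uncovered routes with a filter, places a camera at the earliest exit among them, and repeats until none remain.
-- outside the precondition, e.g. on solution([[0, -40000], [-35000, -35000]]): A returns 2, B returns 1; on solution([[1]]): A raises IndexError, B raises IndexError
import Mathlib
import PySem

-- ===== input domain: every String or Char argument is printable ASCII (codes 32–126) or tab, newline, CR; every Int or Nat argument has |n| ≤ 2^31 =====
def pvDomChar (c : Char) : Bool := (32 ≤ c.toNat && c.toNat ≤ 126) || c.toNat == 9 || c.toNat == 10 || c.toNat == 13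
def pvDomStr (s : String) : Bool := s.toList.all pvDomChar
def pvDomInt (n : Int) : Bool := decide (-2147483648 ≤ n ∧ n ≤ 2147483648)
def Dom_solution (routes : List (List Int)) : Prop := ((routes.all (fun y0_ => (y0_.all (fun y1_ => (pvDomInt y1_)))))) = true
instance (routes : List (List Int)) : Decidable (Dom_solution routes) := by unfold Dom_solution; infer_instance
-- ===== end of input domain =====

-- B replaces A's one-pass (answer, key) state machine by a round-based stabbing loop that
-- rebuilds the list of still-uncovered routes each round; the equivalence is about the RETURN
-- value only (Python A sorts `routes` in place, B leaves its argument untouched).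


-- ===== PORT A =====
-- route[0] / route[1] / the sort key x[1] are ported as getD; exact on Pre_ (every route has
-- length ≥ 2 — Python raises IndexError on shorter routes).
def solutionLoop : List (List Int) → Int → Int → Int
  | [], answer, _key => answer
  | route :: rest, answer, key =>
    if route.getD 0 0 > key then solutionLoop rest (answer + 1) (route.getD 1 0)
    else solutionLoop rest answer key

def solution (routes : List (List Int)) : Int :=
  solutionLoop (PySem.List.sorted routes (fun x => x.getD 1 0) false) 0 (-30001)

-- ===== PORT B =====
def solutionAltLoop (remaining : List (List Int)) (answer : Int) (key : Int) : Int :=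
  match h : remaining.filter (fun p => decide (key < p.getD 0 0)) with
  | [] => answer
  | p :: rest => solutionAltLoop rest (answer + 1) (p.getD 1 0)
termination_by remaining.length
decreasing_by
  have hle := List.length_filter_le (fun p => decide (key < p.getD 0 0)) remaining
  rw [h] at hle
  simp only [List.length_cons] at hle
  omega

def solution_alt (routes : List (List Int)) : Int :=
  solutionAltLoop (PySem.List.sorted routes (fun r => r.getD 1 0) false) 0 (-30001)

-- ===== PRECONDITION & SPEC =====
-- Pre_ excludes: routes with fewer than 2 entries, on which A (and B) raises IndexError; and
-- routes whose exit point lies below A's sentinel -30001 — outside the problem's stated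
-- coordinate domain (-30000 ≤ point) — where A's value is an artefact of its sentinel key
-- dropping below the starting value.
def Pre_solution (routes : List (List Int)) : Prop :=
  ∀ r ∈ routes, 2 ≤ r.length ∧ -30001 ≤ r.getD 1 0
instance (routes : List (List Int)) : Decidable (Pre_solution routes) := by
  unfold Pre_solution; infer_instance

def pvWitness_solution : List (List Int) := [[-20, -15], [-18, 30], [5, 7]]

def Spec_solution (routes : List (List Int)) (out : Int) : Prop := out = solution_alt routes
instance (routes : List (List Int)) (out : Int) : Decidable (Spec_solution routes out) := by
  unfold Spec_solution; infer_instance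

-- ===== CLAIM (what is proved, stated in full; the proofs are below) =====
def Claim_equal_solution : Prop := ∀ (routes : List (List Int)), Dom_solution routes → Pre_solution routes → Spec_solution routes (solution routes)

-- ===== LEMMAS AND PROOFS =====

-- A's loop on (start, end) pairs, without the answer accumulator.
def aGo : List (Int × Int) → Int → Int
  | [], _ => 0
  | (s, e) :: t, k => if s > k then 1 + aGo t e else aGo t k

-- B's loop on (start, end) pairs, without the answer accumulator.
def dGo (l : List (Int × Int)) (k : Int) : Int :=
  match h : l.filter (fun p => decide (k < p.1)) with
  | [] => 0
  | p :: rest => 1 + dGo rest p.2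
termination_by l.length
decreasing_by
  have hle := List.length_filter_le (fun p => decide (k < p.1)) l
  rw [h] at hle
  simp only [List.length_cons] at hle
  omega

def toPair (r : List Int) : Int × Int := (r.getD 0 0, r.getD 1 0)

theorem bridgeA (l : List (List Int)) (ans k : Int) :
    solutionLoop l ans k = ans + aGo (l.map toPair) k := by
  induction l generalizing ans k with
  | nil => simp [solutionLoop, aGo]
  | cons r t ih =>
    simp only [solutionLoop, List.map_cons, toPair, aGo]
    split_ifs with h
    · rw [ih]; ring
    · rw [ih]

-- dGo only looks at its argument through the filter.
theorem dGo_congr (l₁ l₂ : List (Int × Int)) (k : Int)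
    (h : l₁.filter (fun p => decide (k < p.1)) = l₂.filter (fun p => decide (k < p.1))) :
    dGo l₁ k = dGo l₂ k := by
  rw [dGo, dGo, h]

theorem bridgeB : ∀ (n : ℕ) (l : List (List Int)), l.length ≤ n → ∀ (ans k : Int),
    solutionAltLoop l ans k = ans + dGo (l.map toPair) k := by
  intro n
  induction n with
  | zero =>
    intro l hl ans k
    have : l = [] := List.length_eq_zero_iff.mp (Nat.le_zero.mp hl)
    subst this
    rw [solutionAltLoop, dGo]
    simp
  | succ n ih =>
    intro l hl ans k
    have hmapf : (l.map toPair).filter (fun p => decide (k < p.1))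
        = (l.filter (fun r => decide (k < r.getD 0 0))).map toPair := by
      rw [List.filter_map]
      rfl
    rw [solutionAltLoop, dGo, hmapf]
    cases hF : l.filter (fun r => decide (k < r.getD 0 0)) with
    | nil => simp
    | cons r rest =>
      simp only [List.map_cons]
      have hlen : rest.length + 1 ≤ l.length := by
        have hle := List.length_filter_le (fun r => decide (k < r.getD 0 0)) l
        rw [hF] at hle
        simpa using hle
      rw [ih rest (by omega) (ans + 1) (r.getD 1 0)]
      simp only [toPair]
      ring

-- Core: the one-pass scan and the round-based filtering loop agree whenever the key never
-- exceeds any remaining exit point (the list being end-sorted keeps this invariant).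
theorem aGo_eq_dGo : ∀ (n : ℕ) (L : List (Int × Int)) (k : Int), L.length ≤ n →
    L.Pairwise (fun a b => a.2 ≤ b.2) → (∀ p ∈ L, k ≤ p.2) → aGo L k = dGo L k := by
  intro n
  induction n with
  | zero =>
    intro L k hl _ _
    have : L = [] := List.length_eq_zero_iff.mp (Nat.le_zero.mp hl)
    subst this
    rw [aGo, dGo]
    simp
  | succ n ih =>
    intro L k hl hpw hk
    cases L with
    | nil => simp [aGo, dGo]
    | cons p t =>
      rcases p with ⟨s, e⟩
      have hpw' := List.pairwise_cons.mp hpw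
      have hke : k ≤ e := hk _ List.mem_cons_self
      have hlt : t.length ≤ n := by simpa using Nat.lt_succ_iff.mp (lt_of_lt_of_le (by simp) hl)
      by_cases hs : s > k
      · -- head is counted: B's round keeps it at the front of the filtered list
        have hfc : ((s, e) :: t).filter (fun p => decide (k < p.1))
            = (s, e) :: t.filter (fun p => decide (k < p.1)) := by
          simp [hs]
        have hstep : dGo ((s, e) :: t) k = 1 + dGo (t.filter (fun p => decide (k < p.1))) e := by
          rw [dGo]
          split
          · next heq => rw [hfc] at heq; exact absurd heq (by simp)
          · next p rest heq =>
            rw [hfc] at heq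
            cases heq
            rfl
        rw [aGo, if_pos hs, hstep]
        have h1 : aGo t e = dGo t e :=
          ih t e hlt hpw'.2 (fun q hq => hpw'.1 q hq)
        have h2 : dGo t e = dGo (t.filter (fun p => decide (k < p.1))) e := by
          apply dGo_congr
          rw [List.filter_filter]
          apply List.filter_congr
          intro q _
          by_cases hq : e < q.1
          · simp [hq, lt_of_le_of_lt hke hq]
          · simp [hq]
        rw [h1, h2]
      · -- head is skipped: it also vanishes from B's filter
        have hstep : dGo ((s, e) :: t) k = dGo t k := by
          apply dGo_congr
          simp [hs]
        rw [aGo, if_neg hs, hstep]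
        exact ih t k hlt hpw'.2 (fun q hq => le_trans hke (hpw'.1 q hq))

-- ===== VERDICT (by name: the statement is the Claim_ definition above) =====
theorem solution_spec : Claim_equal_solution := by
  intro routes _hdom hpre
  unfold Spec_solution solution solution_alt
  rw [bridgeA, bridgeB (PySem.List.sorted routes (fun r => r.getD 1 0) false).length _ le_rfl]
  set L := (PySem.List.sorted routes (fun x => x.getD 1 0) false).map toPair with hL
  have hpw : L.Pairwise (fun a b => a.2 ≤ b.2) := by
    rw [hL]
    exact List.pairwise_map.mpr (PySem.List.sorted_pairwise routes (fun x => x.getD 1 0))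
  have hend : ∀ p ∈ L, -30001 ≤ p.2 := by
    intro p hp
    rcases List.mem_map.mp hp with ⟨r, hr, hrp⟩
    rw [← hrp]
    exact (hpre r ((PySem.List.mem_sorted _ _ _ _).mp hr)).2
  rw [aGo_eq_dGo L.length L (-30001) le_rfl hpw hend]
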